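-- pv_equiv track=rewrite | github.com/hawkjo/freebarcodes | freebarcodes/FreeDivSphere.py | _substitution_seqs
-- ===== SOURCE A (Python) =====
-- import itertools
--
-- bases = 'ACGT'
--
-- def _substitution_seqs(seq, idxtup):
--     """Iterates all sequences with mutations at given idxs from given seq."""
--     if not idxtup:
--         yield seq
--     else:
--         all_mm_bases = [bases.replace(seq[i], '') for i in idxtup]
--         for mm_bases in itertools.product(*all_mm_bases):
--             newseq = seq[:idxtup[0]]
--             for i, c in enumerate(mm_bases[:-1]):
--                 newseq += c + seq[idxtup[i] + 1:idxtup[i+1]]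
--             newseq += mm_bases[-1] + seq[idxtup[-1]+1:]
--             yield newseq
-- ===== SOURCE B (Python) =====
-- bases = 'ACGT'
--
-- def _substitution_seqs(seq, idxtup):
--     """Iterates all sequences with mutations at given idxs from given seq."""
--     def rec(j, k):
--         if k == len(idxtup):
--             yield seq[j:]
--         else:
--             i = idxtup[k]
--             head = seq[j:i]
--             for c in bases.replace(seq[i], ''):
--                 for tail in rec(i + 1, k + 1):
--                     yield head + c + tail
--
--     yield from rec(0, 0)
-- ===== Notes on version B (the rewrite author's own statement) =====
-- stated objective: simpler
-- what changed: B drops itertools.product and the per-combination slice stitching entirely: a recursive generator walks the index list once, yielding head + c + tail where the tail suffixes come from the recursive call starting after the current index, so each variant is composed right-to-left from shared suffix generators instead of being reassembled from a precomputed combination tuple.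
import Mathlib
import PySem

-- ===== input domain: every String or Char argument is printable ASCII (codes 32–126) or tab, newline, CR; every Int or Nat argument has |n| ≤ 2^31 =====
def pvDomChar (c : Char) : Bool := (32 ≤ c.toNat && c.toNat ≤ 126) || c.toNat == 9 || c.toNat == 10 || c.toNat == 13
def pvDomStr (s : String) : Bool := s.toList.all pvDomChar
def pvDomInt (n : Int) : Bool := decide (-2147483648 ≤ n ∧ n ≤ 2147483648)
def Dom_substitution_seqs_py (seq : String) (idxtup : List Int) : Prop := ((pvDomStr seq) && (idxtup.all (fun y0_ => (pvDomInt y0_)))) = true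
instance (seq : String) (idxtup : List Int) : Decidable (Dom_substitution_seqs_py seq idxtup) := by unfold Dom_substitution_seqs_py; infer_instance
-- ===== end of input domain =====

-- B replaces A's itertools.product plus per-combination slice stitching by a single recursive
-- generator over the index list that yields head + c + tail for each recursively generated tail
-- suffix (objective: simpler; no product combinations are ever materialised).

-- ===== PORT A =====

-- itertools.product(*lists) over lists of chars, in CPython's order (first list slowest)
def pyProduct : List (List Char) → List (List Char)
  | [] => [[]]
  | xs :: rest => xs.flatMap (fun a => (pyProduct rest).map (a :: ·))

-- bases.replace(seq[i], ''); seq[i] raises IndexError exactly when pyGet? = none (excluded by Pre_)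
def mmBases (s : List Char) (i : Int) : List Char :=
  PySem.Chars.replace ['A', 'C', 'G', 'T'] [(PySem.List.pyGet? s i).getD 'A'] []

-- the loop 'for i, c in enumerate(mm_bases[:-1]): newseq += c + seq[idxtup[i]+1:idxtup[i+1]]'
-- (k is the enumerate counter; the idxtup lookups are in range whenever Python's are, so getD is never the default there)
def aLoop (s : List Char) (idxtup : List Int) : Nat → List Char → List Char → List Char
  | _, acc, [] => acc
  | k, acc, c :: cs =>
      aLoop s idxtup (k + 1)
        (acc ++ c :: PySem.List.slice s
          (some ((PySem.List.pyGet? idxtup (k : Int)).getD 0 + 1))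
          (some ((PySem.List.pyGet? idxtup ((k : Int) + 1)).getD 0)))
        cs

def substitution_seqs_py (seq : String) (idxtup : List Int) : List String :=
  if idxtup = [] then [seq]
  else
    let s := seq.toList
    let all_mm_bases := idxtup.map (mmBases s)
    (pyProduct all_mm_bases).map (fun mm =>
      String.ofList
        (aLoop s idxtup 0
            (PySem.List.slice s none (some ((PySem.List.pyGet? idxtup 0).getD 0)))
            (PySem.List.slice mm none (some (-1)))
          ++ (PySem.List.pyGet? mm (-1)).getD 'A'
            :: PySem.List.slice s (some ((PySem.List.pyGet? idxtup (-1)).getD 0 + 1)) none))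

-- ===== PORT B =====

-- rec(j, k): 'if k == len(idxtup): yield seq[j:]' else loop over the mismatch chars at
-- idxtup[k] and over the recursive suffixes rec(idxtup[k]+1, k+1), yielding head + c + tail.
-- (Python's k counter into idxtup becomes structural recursion on the remaining index list.)
def bRec (s : List Char) : Int → List Int → List (List Char)
  | j, [] => [PySem.List.slice s (some j) none]
  | j, i :: rest =>
      (mmBases s i).flatMap (fun c =>
        (bRec s (i + 1) rest).map (fun tail =>
          PySem.List.slice s (some j) (some i) ++ c :: tail))

-- 'yield from rec(0, 0)'
def substitution_seqs_py_alt (seq : String) (idxtup : List Int) : List String :=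
  (bRec seq.toList 0 idxtup).map String.ofList

-- ===== PRECONDITION & SPEC =====
-- Pre_ holds exactly when every seq[i] lookup for i in idxtup is in range;
-- outside it A (and B) raise IndexError.
def Pre_substitution_seqs_py (seq : String) (idxtup : List Int) : Prop :=
  ∀ i ∈ idxtup, -(seq.toList.length : Int) ≤ i ∧ i < (seq.toList.length : Int)
instance (seq : String) (idxtup : List Int) : Decidable (Pre_substitution_seqs_py seq idxtup) := by
  unfold Pre_substitution_seqs_py; infer_instance

def pvWitness_substitution_seqs_py : String × List Int := ("ACGT", [1, 3])

def Spec_substitution_seqs_py (seq : String) (idxtup : List Int) (out : List String) : Prop :=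
  out = substitution_seqs_py_alt seq idxtup
instance (seq : String) (idxtup : List Int) (out : List String) : Decidable (Spec_substitution_seqs_py seq idxtup out) := by
  unfold Spec_substitution_seqs_py; infer_instance

-- ===== CLAIM (what is proved, stated in full; the proofs are below) =====
def Claim_equal_substitution_seqs_py : Prop :=
  ∀ (seq : String) (idxtup : List Int), Dom_substitution_seqs_py seq idxtup →
    Pre_substitution_seqs_py seq idxtup →
    Spec_substitution_seqs_py seq idxtup (substitution_seqs_py seq idxtup)

-- ===== LEMMAS AND PROOFS =====

-- the value nest s j idxs mm = seq[j:i0] + mm0 + seq[i0+1:i1] + mm1 + … + seq[ik+1:]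
-- (proof-only characterisation shared by both ports)
def nest (s : List Char) : Int → List Int → List Char → List Char
  | j, [], _ => PySem.List.slice s (some j) none
  | _, _ :: _, [] => []
  | j, i :: rest, c :: cs =>
      PySem.List.slice s (some j) (some i) ++ c :: nest s (i + 1) rest cs

theorem bRec_eq_product (s : List Char) :
    ∀ (idxs : List Int) (j : Int),
      bRec s j idxs = (pyProduct (idxs.map (mmBases s))).map (nest s j idxs) := by
  intro idxs
  induction idxs with
  | nil => intro j; simp [bRec, pyProduct, nest]
  | cons i rest ih =>
      intro j
      simp [bRec, pyProduct, ih (i + 1), List.map_flatMap, List.map_map, Function.comp_def, nest]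

theorem aLoop_acc (s : List Char) (idxtup : List Int) (cs : List Char) :
    ∀ (k : Nat) (acc : List Char), aLoop s idxtup k acc cs = acc ++ aLoop s idxtup k [] cs := by
  induction cs with
  | nil => intro k acc; simp [aLoop]
  | cons c cs ih =>
      intro k acc
      rw [aLoop, aLoop, ih (k + 1), ih (k + 1) ([] ++ _)]
      simp

theorem aLoop_shift (s : List Char) (i0 : Int) (rest : List Int) (cs : List Char) :
    ∀ (k : Nat) (acc : List Char),
      aLoop s (i0 :: rest) (k + 1) acc cs = aLoop s rest k acc cs := by
  induction cs with
  | nil => intro k acc; rfl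
  | cons c cs ih =>
      intro k acc
      rw [aLoop, aLoop, ih (k + 1)]
      have hA : PySem.List.pyGet? (i0 :: rest) ((k + 1 : Nat) : Int)
          = PySem.List.pyGet? rest (k : Int) := by
        have h := PySem.List.pyGet?_cons_succ i0 rest k; push_cast; exact h
      have hB : PySem.List.pyGet? (i0 :: rest) (((k + 1 : Nat) : Int) + 1)
          = PySem.List.pyGet? rest ((k : Int) + 1) := by
        have h := PySem.List.pyGet?_cons_succ i0 rest (k + 1); push_cast at h ⊢; exact h
      rw [hA, hB]

theorem length_of_mem_pyProduct (ls : List (List Char)) (mm : List Char)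
    (h : mm ∈ pyProduct ls) : mm.length = ls.length := by
  induction ls generalizing mm with
  | nil => simp [pyProduct] at h; simp [h]
  | cons xs rest ih =>
      simp only [pyProduct, List.mem_flatMap, List.mem_map] at h
      obtain ⟨a, _, m', hm', rfl⟩ := h
      simp [ih m' hm']

-- the body of A's per-combination reconstruction equals the shared characterisation nest
theorem recon_eq (idxtup : List Int) :
    ∀ (mm s : List Char), mm.length = idxtup.length → idxtup ≠ [] →
      aLoop s idxtup 0
          (PySem.List.slice s none (some ((PySem.List.pyGet? idxtup 0).getD 0)))
          (PySem.List.slice mm none (some (-1)))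
        ++ (PySem.List.pyGet? mm (-1)).getD 'A'
          :: PySem.List.slice s (some ((PySem.List.pyGet? idxtup (-1)).getD 0 + 1)) none
      = nest s 0 idxtup mm := by
  induction idxtup with
  | nil => intro _ _ _ hne; exact absurd rfl hne
  | cons i0 rest ih =>
      intro mm s hlen _
      obtain ⟨c0, mm, rfl⟩ : ∃ c t, mm = c :: t := by
        cases mm with
        | nil => simp at hlen
        | cons c t => exact ⟨c, t, rfl⟩
      cases rest with
      | nil =>
          -- single index: newseq = seq[:i0] + c0 + seq[i0+1:]
          obtain rfl : mm = [] := by simpa using hlen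
          rw [PySem.List.slice_to_neg_one, List.dropLast_singleton,
            PySem.List.pyGet?_neg_one, List.getLast?_singleton,
            PySem.List.pyGet?_neg_one, List.getLast?_singleton]
          simp [aLoop, nest]
      | cons i1 rest' =>
          obtain ⟨c1, cs, rfl⟩ : ∃ c t, mm = c :: t := by
            cases mm with
            | nil => simp at hlen
            | cons c t => exact ⟨c, t, rfl⟩
          have e3 : PySem.List.pyGet? (i0 :: i1 :: rest') (-1)
              = PySem.List.pyGet? (i1 :: rest') (-1) := by
            rw [PySem.List.pyGet?_neg_one, PySem.List.pyGet?_neg_one, List.getLast?_cons_cons]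
          have e4 : PySem.List.pyGet? (c0 :: c1 :: cs) (-1)
              = PySem.List.pyGet? (c1 :: cs) (-1) := by
            rw [PySem.List.pyGet?_neg_one, PySem.List.pyGet?_neg_one, List.getLast?_cons_cons]
          have e5 : PySem.List.pyGet? (i0 :: i1 :: rest') (((0 : Nat) : Int)) = some i0 := by
            push_cast; exact PySem.List.pyGet?_zero_cons i0 (i1 :: rest')
          have e6 : PySem.List.pyGet? (i0 :: i1 :: rest') (((0 : Nat) : Int) + 1)
              = some i1 := by
            push_cast
            have h := PySem.List.pyGet?_cons_succ i0 (i1 :: rest') 0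
            push_cast at h
            rw [h]; exact PySem.List.pyGet?_zero_cons i1 rest'
          -- unroll A's first loop iteration and shift to the tail index list
          rw [PySem.List.slice_to_neg_one, List.dropLast_cons₂,
            PySem.List.pyGet?_zero_cons, e3, e4, aLoop, e5, e6]
          simp only [Option.getD_some]
          rw [show (0 + 1 : Nat) = 1 from rfl, aLoop_shift s i0 (i1 :: rest') _ 0, aLoop_acc]
          -- IH for the tail, rearranged through aLoop_acc
          have hIH := ih (c1 :: cs) s (by simpa using hlen) (by simp)
          rw [aLoop_acc, PySem.List.pyGet?_zero_cons, Option.getD_some,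
            List.append_assoc] at hIH
          simp only [nest, PySem.List.slice_zero_start] at hIH ⊢
          have htail := List.append_cancel_left hIH
          rw [PySem.List.slice_to_neg_one] at htail
          rw [← htail]
          simp [List.append_assoc]

-- ===== VERDICT (by name: the statement is the Claim_ definition above) =====
theorem substitution_seqs_py_spec : Claim_equal_substitution_seqs_py := by
  intro seq idxtup _hdom _hpre
  unfold Spec_substitution_seqs_py
  by_cases h : idxtup = []
  · subst h
    simp [substitution_seqs_py, substitution_seqs_py_alt, bRec, PySem.List.slice_zero_start,
      PySem.List.slice_none_none]
  · unfold substitution_seqs_py substitution_seqs_py_alt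
    rw [if_neg h, bRec_eq_product, List.map_map]
    apply List.map_congr_left
    intro mm hmm
    have hlen : mm.length = idxtup.length := by
      simpa using length_of_mem_pyProduct _ mm hmm
    exact congrArg String.ofList (recon_eq idxtup mm seq.toList hlen h)
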